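-- pv_equiv track=rewrite | github.com/qsdrqs/sactor | sactor/verifier/selftest/struct_roundtrip.py | _render_idiomatic_expr
-- ===== SOURCE A (Python) =====
-- def _render_idiomatic_expr(base: str, path: str) -> str:
--     tokens = [seg.strip() for seg in path.split(".") if seg.strip()]
--     expr = base
--     for idx, token in enumerate(tokens):
--         if token == "len" and idx == len(tokens) - 1:
--             expr = f"({expr}).len()"
--         else:
--             expr = f"{expr}.{token}"
--     return expr
-- ===== SOURCE B (Python) =====
-- def _render_idiomatic_expr(base: str, path: str) -> str:
--     tokens = list(filter(None, (seg.strip() for seg in path.split("."))))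
--     if tokens and tokens[-1] == "len":
--         return f"({'.'.join([base] + tokens[:-1])}).len()"
--     return ".".join([base] + tokens)
-- ===== Notes on version B (the rewrite author's own statement) =====
-- stated objective: simpler
-- what changed: A threads an accumulator through an indexed loop testing 'is this the last token' at every step; B tests the last token once up front and builds the result with a single '.'.join over the (possibly shortened) token list.
import Mathlib
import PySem

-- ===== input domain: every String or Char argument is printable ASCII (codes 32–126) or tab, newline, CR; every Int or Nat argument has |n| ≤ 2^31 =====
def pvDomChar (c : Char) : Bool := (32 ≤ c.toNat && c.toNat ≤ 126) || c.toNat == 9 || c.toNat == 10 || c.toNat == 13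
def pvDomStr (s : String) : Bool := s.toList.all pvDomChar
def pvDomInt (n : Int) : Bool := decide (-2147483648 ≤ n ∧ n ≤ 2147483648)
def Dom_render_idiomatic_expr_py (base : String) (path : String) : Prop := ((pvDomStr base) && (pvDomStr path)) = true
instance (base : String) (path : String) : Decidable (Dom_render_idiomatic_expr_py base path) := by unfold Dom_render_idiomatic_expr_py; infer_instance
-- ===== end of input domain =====

-- B lifts the "last token is len" test out of the loop and replaces A's accumulating
-- loop with a single join over the token list (objective: simpler; same cost).

-- ===== PORT A =====
-- '[seg.strip() for seg in path.split(".") if seg.strip()]' : filter, then map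
def pvTokensA (path : List Char) : List (List Char) :=
  ((PySem.Chars.splitOn path ['.']).filter
      (fun seg => PySem.Chars.strip seg ≠ [])).map PySem.Chars.strip

def render_idiomatic_expr_py (base : String) (path : String) : String :=
  let tokens := pvTokensA path.toList
  String.mk <|
    (PySem.List.enumerate tokens).foldl
      (fun expr p =>
        if p.2 = "len".toList ∧ p.1 = (tokens.length : Int) - 1 then
          '(' :: expr ++ ").len()".toList
        else
          expr ++ '.' :: p.2)
      base.toList

-- ===== PORT B =====
-- 'list(filter(None, (seg.strip() for seg in path.split("."))))' : map, then filter
def pvTokensB (path : List Char) : List (List Char) :=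
  ((PySem.Chars.splitOn path ['.']).map PySem.Chars.strip).filter (· ≠ [])

def render_idiomatic_expr_py_alt (base : String) (path : String) : String :=
  let tokens := pvTokensB path.toList
  String.mk <|
    if tokens.getLast? = some "len".toList then
      '(' :: PySem.Chars.join ['.'] (base.toList :: tokens.dropLast) ++ ").len()".toList
    else
      PySem.Chars.join ['.'] (base.toList :: tokens)

-- ===== PRECONDITION & SPEC =====
def Spec_render_idiomatic_expr_py (base : String) (path : String) (out : String) : Prop := out = render_idiomatic_expr_py_alt base path
instance (base : String) (path : String) (out : String) : Decidable (Spec_render_idiomatic_expr_py base path out) := by unfold Spec_render_idiomatic_expr_py; infer_instance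

-- ===== CLAIM (what is proved, stated in full; the proofs are below) =====
def Claim_equal_render_idiomatic_expr_py : Prop := ∀ (base : String) (path : String), Dom_render_idiomatic_expr_py base path → Spec_render_idiomatic_expr_py base path (render_idiomatic_expr_py base path)

-- ===== LEMMAS AND PROOFS =====

theorem pvTokens_eq (path : List Char) : pvTokensA path = pvTokensB path := by
  unfold pvTokensA pvTokensB
  rw [List.filter_map]
  rfl

theorem pvJoin_foldl (ts : List (List Char)) (b : List Char) :
    PySem.Chars.join ['.'] (b :: ts) = ts.foldl (fun e t => e ++ '.' :: t) b := by
  induction ts generalizing b with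
  | nil => simp [PySem.Chars.join_singleton]
  | cons t ts ih =>
      have h : PySem.Chars.join ['.'] (b :: t :: ts)
          = PySem.Chars.join ['.'] ((b ++ '.' :: t) :: ts) := by
        cases ts with
        | nil => simp [PySem.Chars.join_cons_cons, PySem.Chars.join_singleton]
        | cons u us => simp [PySem.Chars.join_cons_cons]
      rw [List.foldl_cons, ← ih (b ++ '.' :: t), h]

theorem pv_main (tokens : List (List Char)) (b : List Char) :
    (PySem.List.enumerate tokens).foldl
      (fun expr p =>
        if p.2 = "len".toList ∧ p.1 = (tokens.length : Int) - 1 then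
          '(' :: expr ++ ").len()".toList
        else
          expr ++ '.' :: p.2)
      b
    = (if tokens.getLast? = some "len".toList then
        '(' :: PySem.Chars.join ['.'] (b :: tokens.dropLast) ++ ").len()".toList
      else
        PySem.Chars.join ['.'] (b :: tokens)) := by
  rcases List.eq_nil_or_concat tokens with h | ⟨ts, t, h⟩
  · subst h; simp [PySem.List.enumerate, PySem.Chars.join_singleton]
  · subst h
    rw [List.concat_eq_append, PySem.List.enumerate_append, List.foldl_append]
    have hpre :
        (PySem.List.enumerate ts).foldl
          (fun expr p =>
            if p.2 = "len".toList ∧ p.1 = ((ts ++ [t]).length : Int) - 1 then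
              '(' :: expr ++ ").len()".toList
            else
              expr ++ '.' :: p.2)
          b
        = PySem.Chars.join ['.'] (b :: ts) := by
      have hcongr :
          (PySem.List.enumerate ts).foldl
            (fun expr p =>
              if p.2 = "len".toList ∧ p.1 = ((ts ++ [t]).length : Int) - 1 then
                '(' :: expr ++ ").len()".toList
              else
                expr ++ '.' :: p.2)
            b
          = (PySem.List.enumerate ts).foldl (fun expr p => expr ++ '.' :: p.2) b := by
        apply PySem.List.foldl_congr_mem
        intro acc p hp
        rcases (PySem.List.mem_enumerate_iff ts 0 p).1 hp with ⟨k, hk, rfl⟩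
        have hne : ¬ ((0 + (k : Int)) = ((ts ++ [t]).length : Int) - 1) := by
          simp only [List.length_append, List.length_cons, List.length_nil]
          omega
        rw [if_neg (by rintro ⟨_, h2⟩; exact hne h2)]
      rw [hcongr, pvJoin_foldl]
      calc (PySem.List.enumerate ts).foldl (fun expr p => expr ++ '.' :: p.2) b
          = ((PySem.List.enumerate ts).map (·.2)).foldl (fun e t => e ++ '.' :: t) b :=
            by rw [List.foldl_map]
        _ = ts.foldl (fun e t => e ++ '.' :: t) b := by
            rw [PySem.List.map_snd_enumerate]
    rw [hpre]
    simp only [PySem.List.enumerate, List.foldl_cons, List.foldl_nil,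
      List.getLast?_concat, List.dropLast_concat, List.length_append,
      Option.some.injEq]
    by_cases ht : t = "len".toList
    · have hidx : (0 + (ts.length : Int)) = ((ts.length + 1 : Nat) : Int) - 1 := by
        push_cast; ring
      simp [ht, hidx]
    · rw [if_neg (by rintro ⟨h1, _⟩; exact ht h1), if_neg (by simpa using ht)]
      rw [pvJoin_foldl, pvJoin_foldl, List.foldl_append]
      simp

-- ===== VERDICT (by name: the statement is the Claim_ definition above) =====
theorem render_idiomatic_expr_py_spec : Claim_equal_render_idiomatic_expr_py := by
  intro base path _
  unfold Spec_render_idiomatic_expr_py render_idiomatic_expr_py render_idiomatic_expr_py_alt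
  rw [pvTokens_eq]
  exact congrArg String.mk (pv_main (pvTokensB path.toList) base.toList)
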